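-- pv_equiv track=rewrite | github.com/fkariminejadasl/bird-behavior | behavior/data.py | identify_and_process_groups
-- ===== SOURCE A (Python) =====
-- def identify_and_process_groups(data, glen=20):
--     """
--     Identify and process groups of items with consecutive indices.
--
--     Parameters
--     ----------
--     data : list of list
--         A list of items, where each item is a list containing an index and additional values.
--         The indices are expected to be in a sorted and potentially grouped sequential order.
--     glen : int
--         Group length. Default is 20.
--
--     Returns
--     -------
--     list of list
--         A list containing subgroups of the input items. Each subgroup is a list of exactly
--         20 items from the original list, based on consecutive indices, and only subgroups that
--         could be fully formed (i.e., with exactly 20 elements) are included.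
--
--     Examples
--     --------
--     >>> data = [[1, 'a'], [2, 'b'], ..., [46, 'x'], [1, 'y'], ..., [60, 'aa']]
--     >>> identify_and_process_groups(data)
--     [[[1, 'a'], [2, 'b'], ..., [20, 't']], [[21, 'u'], [22, 'v'], ..., [40, 'dd']]]
--     """
--     indices = [item[0] for item in data]
--     groups = []
--     current_group = [(indices[0], 0)]  # Store index along with its position
--
--     for i in range(1, len(indices)):
--         if indices[i] == current_group[-1][0] + 1:
--             current_group.append((indices[i], i))
--         else:
--             groups.append(current_group)
--             current_group = [(indices[i], i)]
--
--     groups.append(current_group)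
--     filtered_groups = [group for group in groups if len(group) >= glen]
--
--     final_groups = []
--     for group in filtered_groups:
--         for i in range(0, len(group), glen):
--             subgroup_tuples = group[i : i + glen]
--             if len(subgroup_tuples) == glen:
--                 subgroup = [data[t[1]] for t in subgroup_tuples]
--                 final_groups.append(subgroup)
--
--     return final_groups
-- ===== SOURCE B (Python) =====
-- def identify_and_process_groups(data, glen=20):
--     """One-pass re-implementation: keep the current run of consecutive-index
--     items directly, and flush its complete glen-sized chunks inline."""
--     def flush(run, out):
--         for i in range(0, (len(run) // glen) * glen, glen):
--             out.append(run[i:i + glen])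
--     out = []
--     run = [data[0]]
--     for item in data[1:]:
--         if item[0] == run[-1][0] + 1:
--             run.append(item)
--         else:
--             flush(run, out)
--             run = [item]
--     flush(run, out)
--     return out
-- ===== Notes on version B (the rewrite author's own statement) =====
-- stated objective: simpler
-- what changed: B is a single pass that keeps the current run of data items directly and emits complete glen-sized chunks inline when a run ends, instead of A's three phases (build an indices list plus (index, position) tuple runs, filter runs by length, then re-slice each run and re-fetch items by stored position).
import Mathlib
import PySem

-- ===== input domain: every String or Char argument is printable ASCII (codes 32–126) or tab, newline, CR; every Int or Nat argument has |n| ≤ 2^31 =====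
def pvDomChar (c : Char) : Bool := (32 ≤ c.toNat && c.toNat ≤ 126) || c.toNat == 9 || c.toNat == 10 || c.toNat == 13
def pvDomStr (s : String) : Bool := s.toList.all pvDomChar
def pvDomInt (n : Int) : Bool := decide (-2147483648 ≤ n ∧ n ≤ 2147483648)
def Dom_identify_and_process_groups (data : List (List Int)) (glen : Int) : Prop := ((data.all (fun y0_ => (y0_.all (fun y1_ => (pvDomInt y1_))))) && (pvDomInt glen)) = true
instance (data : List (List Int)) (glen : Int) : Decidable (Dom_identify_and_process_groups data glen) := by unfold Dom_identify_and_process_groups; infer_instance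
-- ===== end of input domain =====

-- B re-implements A as a single pass: it keeps the current run of items directly and flushes the
-- run's complete glen-sized chunks inline (objective: simpler — no (index, position) tuples,
-- no groups list, no filter pass, no re-fetch of items by stored position).

-- ===== PORT A =====
-- item[0] (Pre_ guarantees every item is nonempty, so the default is never taken)
def pvHead0 (item : List Int) : Int := (PySem.List.pyGet? item 0).getD 0

-- indices = [item[0] for item in data]
def pvIndices (data : List (List Int)) : List Int := data.map pvHead0

-- data[t[1]] (the positions A stores are always in range)
def pvFetch (data : List (List Int)) (t : Int × Int) : List Int :=
  (PySem.List.pyGet? data t.2).getD []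

-- the body of A's first loop (current_group[-1][0] via pyGet? at -1)
def pvStepA (indices : List Int) (s : List (List (Int × Int)) × List (Int × Int)) (i : Int) :
    List (List (Int × Int)) × List (Int × Int) :=
  let v := (PySem.List.pyGet? indices i).getD 0
  if v = ((PySem.List.pyGet? s.2 (-1)).getD (0, 0)).1 + 1 then
    (s.1, s.2 ++ [(v, i)])
  else
    (s.1 ++ [s.2], [(v, i)])

-- A's inner chunking loop over one group
def pvEmitA (data : List (List Int)) (glen : Int) (acc : List (List (List Int)))
    (g : List (Int × Int)) : List (List (List Int)) :=
  (PySem.List.pyRange 0 (g.length : Int) glen).foldl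
    (fun acc2 i =>
      let sub := PySem.List.slice g (some i) (some (i + glen))
      if (sub.length : Int) = glen then acc2 ++ [sub.map (pvFetch data)] else acc2)
    acc

def identify_and_process_groups (data : List (List Int)) (glen : Int) : List (List (List Int)) :=
  let indices := pvIndices data
  let st := (PySem.List.pyRange 1 (indices.length : Int) 1).foldl (pvStepA indices)
      ([], [((PySem.List.pyGet? indices 0).getD 0, 0)])
  let groups := st.1 ++ [st.2]
  let filtered := groups.filter (fun g => decide (glen ≤ (g.length : Int)))
  filtered.foldl (pvEmitA data glen) []

-- ===== PORT B =====
-- B's flush: emit the complete glen-sized chunks of the current run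
def pvFlush (glen : Int) (run : List (List Int)) (out : List (List (List Int))) :
    List (List (List Int)) :=
  (PySem.List.pyRange 0 (PySem.Int.floordiv (run.length : Int) glen * glen) glen).foldl
    (fun acc i => acc ++ [PySem.List.slice run (some i) (some (i + glen))]) out

-- the body of B's single loop (run[-1][0] via pyGet? at -1, then at 0)
def pvStepB (glen : Int) (s : List (List (List Int)) × List (List Int)) (item : List Int) :
    List (List (List Int)) × List (List Int) :=
  if (PySem.List.pyGet? item 0).getD 0
      = (PySem.List.pyGet? ((PySem.List.pyGet? s.2 (-1)).getD []) 0).getD 0 + 1 then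
    (s.1, s.2 ++ [item])
  else
    (pvFlush glen s.2 s.1, [item])

def identify_and_process_groups_alt (data : List (List Int)) (glen : Int) :
    List (List (List Int)) :=
  let st := (PySem.List.slice data (some 1) none).foldl (pvStepB glen)
      ([], [(PySem.List.pyGet? data 0).getD []])
  pvFlush glen st.2 st.1

-- ===== PRECONDITION & SPEC =====
-- Pre_ excludes exactly the inputs on which the Python A raises: empty data (IndexError on
-- data[0]/indices[0]), an empty item (IndexError on item[0]), and glen = 0 (ValueError from
-- range with step 0).
def Pre_identify_and_process_groups (data : List (List Int)) (glen : Int) : Prop :=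
  data ≠ [] ∧ (∀ item ∈ data, item ≠ []) ∧ glen ≠ 0

instance (data : List (List Int)) (glen : Int) : Decidable (Pre_identify_and_process_groups data glen) := by
  unfold Pre_identify_and_process_groups; infer_instance

def pvWitness_identify_and_process_groups : List (List Int) × Int :=
  ([[1, 7], [2, 8], [3, 9], [9, 0]], 2)

def Spec_identify_and_process_groups (data : List (List Int)) (glen : Int) (out : List (List (List Int))) : Prop := out = identify_and_process_groups_alt data glen
instance (data : List (List Int)) (glen : Int) (out : List (List (List Int))) : Decidable (Spec_identify_and_process_groups data glen out) := by unfold Spec_identify_and_process_groups; infer_instance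

-- ===== CLAIM (what is proved, stated in full; the proofs are below) =====
def Claim_equal_identify_and_process_groups : Prop := ∀ (data : List (List Int)) (glen : Int), Dom_identify_and_process_groups data glen → Pre_identify_and_process_groups data glen → Spec_identify_and_process_groups data glen (identify_and_process_groups data glen)

-- ===== LEMMAS AND PROOFS =====

-- A's tail: groups.append + filter + chunking, as a function of the loop state
def pvFinishA (data : List (List Int)) (glen : Int)
    (st : List (List (Int × Int)) × List (Int × Int)) : List (List (List Int)) :=
  ((st.1 ++ [st.2]).filter (fun g => decide (glen ≤ (g.length : Int)))).foldl (pvEmitA data glen) []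

lemma pv_pyGet_neg_one {α : Type} (xs : List α) : PySem.List.pyGet? xs (-1) = xs.getLast? := by
  cases xs with
  | nil => rfl
  | cons a l =>
    simp [PySem.List.pyGet?, PySem.List.pyIdx?, List.getLast?_eq_getElem?]

lemma pv_range_neg_empty {a b s : Int} (hs : s < 0) (h : a ≤ b) : PySem.List.pyRange a b s = [] := by
  have h1 : ¬ (0 < s) := by omega
  have h2 : ¬ (b < a) := by omega
  simp [PySem.List.pyRange, h1, h2, show s ≠ 0 by omega]

-- pyRange 0 n G with G > 0 as a mapped List.range with an explicit Nat count
lemma pv_range_pos (L G : Nat) (hG : 0 < G) :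
    PySem.List.pyRange 0 (L : Int) (G : Int)
      = (List.range ((L + G - 1) / G)).map (fun k => ((G * k : Nat) : Int)) := by
  rw [PySem.List.pyRange_of_pos _ _ (by exact_mod_cast hG)]
  have hcnt : (if (0:Int) < (L:Int) then (((L:Int) - 0 + G - 1) / G).toNat else 0) = (L + G - 1) / G := by
    by_cases hL : 0 < L
    · rw [if_pos (by exact_mod_cast hL)]
      have : ((L:Int) - 0 + G - 1) = ((L + G - 1 : Nat) : Int) := by omega
      rw [this, ← Int.natCast_div, Int.toNat_natCast]
    · have : L = 0 := by omega
      subst this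
      rw [if_neg (by omega), Nat.div_eq_of_lt (by omega)]
  rw [hcnt]
  apply List.map_congr_left
  intro k _
  push_cast
  ring

lemma pv_fold_if_range {β : Type} (f : Nat → β) (c q : Nat) (hqc : q ≤ c) (acc : List β) :
    (List.range c).foldl (fun acc k => if k < q then acc ++ [f k] else acc) acc
      = (List.range q).foldl (fun acc k => acc ++ [f k]) acc := by
  induction c with
  | zero => have : q = 0 := by omega
            subst this; rfl
  | succ n ih =>
    by_cases hq : q ≤ n
    · rw [List.range_succ, List.foldl_append, ih hq]
      simp [show ¬ n < q by omega]
    · have hqn : q = n + 1 := by omega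
      subst hqn
      exact PySem.List.foldl_congr_mem _ _ _ _ (by
        intro a k hk
        rw [List.mem_range] at hk
        simp [hk])

lemma pv_slice_map {α β : Type} (f : α → β) (xs : List α) (a? b? : Option Int) :
    PySem.List.slice (xs.map f) a? b? = (PySem.List.slice xs a? b?).map f := by
  simp [PySem.List.slice, List.map_take, List.map_drop]

lemma pv_cond_iff (L G k : Nat) (hG : 0 < G) :
    (min G (L - G * k) = G) ↔ k < L / G := by
  have h1 : k < L / G ↔ (k+1) * G ≤ L := by
    rw [Nat.lt_iff_add_one_le, Nat.le_div_iff_mul_le hG]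
  rw [h1, min_eq_left_iff, show (k+1)*G = G*k + G by ring]
  generalize G * k = m
  omega

-- the per-run chunking equivalence: A's "range + drop incomplete slices" equals B's flush
lemma pv_emit_eq_flush (data : List (List Int)) (glen : Int) (hglen : glen ≠ 0)
    (g : List (Int × Int)) (acc : List (List (List Int))) :
    pvEmitA data glen acc g = pvFlush glen (g.map (pvFetch data)) acc := by
  unfold pvEmitA pvFlush
  rw [List.length_map]
  rcases lt_or_gt_of_ne hglen with hneg | hpos
  · rw [pv_range_neg_empty hneg (by positivity),
        pv_range_neg_empty hneg (by
          have h1 := PySem.Int.floordiv_mul_add_mod (g.length : Int) glen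
          have h2 := PySem.Int.mod_neg_bounds (g.length : Int) hneg
          omega)]
    rfl
  · obtain ⟨G, rfl⟩ : ∃ G : Nat, glen = (G : Int) := ⟨glen.toNat, (Int.toNat_of_nonneg hpos.le).symm⟩
    have hG : 0 < G := by exact_mod_cast hpos
    set L := g.length with hL
    rw [PySem.Int.floordiv_natCast, show ((L/G : Nat) : Int) * (G:Int) = ((L/G*G : Nat) : Int) by push_cast; ring,
        pv_range_pos L G hG, pv_range_pos (L/G*G) G hG]
    have hcnt2 : (L/G*G + G - 1) / G = L / G := by
      rw [Nat.mul_comm (L/G) G]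
      rw [show G * (L/G) + G - 1 = (G-1) + G*(L/G) by
            generalize G * (L/G) = m; omega]
      rw [Nat.add_mul_div_left _ _ hG, Nat.div_eq_of_lt (by omega)]
      omega
    rw [hcnt2, List.foldl_map, List.foldl_map]
    have hslice : ∀ k : Nat, PySem.List.slice g (some ((G*k : Nat):Int)) (some (((G*k:Nat):Int) + (G:Int)))
        = List.take G (List.drop (G*k) g) := by
      intro k
      rw [show ((G*k:Nat):Int) + (G:Int) = ((G*k + G : Nat):Int) by push_cast; ring,
          PySem.List.slice_natCast, Nat.add_sub_cancel_left]
    have lhs_eq : (List.range ((L + G - 1) / G)).foldl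
        (fun acc2 k =>
          let sub := PySem.List.slice g (some ((G*k : Nat):Int)) (some (((G*k:Nat):Int) + (G:Int)))
          if (sub.length : Int) = (G:Int) then acc2 ++ [sub.map (pvFetch data)] else acc2) acc
        = (List.range ((L + G - 1) / G)).foldl
        (fun acc2 k => if k < L / G then acc2 ++ [(List.take G (List.drop (G*k) g)).map (pvFetch data)] else acc2) acc := by
      apply PySem.List.foldl_congr_mem
      intro acc2 k _
      simp only [hslice k]
      have hlen : ((List.take G (List.drop (G*k) g)).length : Int) = (G:Int) ↔ k < L / G := by
        rw [List.length_take, List.length_drop, Nat.cast_inj, ← hL]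
        exact pv_cond_iff L G k hG
      exact if_congr hlen rfl rfl
    rw [lhs_eq, pv_fold_if_range _ _ _ (Nat.div_le_div_right (by omega))]
    apply PySem.List.foldl_congr_mem
    intro acc2 k _
    rw [pv_slice_map, hslice k]

lemma pv_range_self (a s : Int) : PySem.List.pyRange a a s = [] := by
  unfold PySem.List.pyRange
  split_ifs with h1 h2 h3 <;> simp_all

lemma pv_emit_short (data : List (List Int)) (glen : Int) (g : List (Int × Int))
    (acc : List (List (List Int))) (h : ¬ glen ≤ (g.length : Int)) :
    pvEmitA data glen acc g = acc := by
  have hpos : 0 < glen := by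
    by_contra hc
    exact h (by omega)
  rw [pv_emit_eq_flush data glen (by omega) g acc]
  unfold pvFlush
  rw [List.length_map]
  obtain ⟨G, rfl⟩ : ∃ G : Nat, glen = (G : Int) := ⟨glen.toNat, (Int.toNat_of_nonneg hpos.le).symm⟩
  rw [PySem.Int.floordiv_natCast, Nat.div_eq_of_lt (by exact_mod_cast not_le.mp h)]
  norm_num [pv_range_self]

-- A's length filter drops exactly the groups whose chunk loop emits nothing
lemma pv_filter_foldl (data : List (List Int)) (glen : Int)
    (gs : List (List (Int × Int))) (acc : List (List (List Int))) :
    (gs.filter (fun g => decide (glen ≤ (g.length : Int)))).foldl (pvEmitA data glen) acc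
      = gs.foldl (pvEmitA data glen) acc := by
  induction gs generalizing acc with
  | nil => rfl
  | cons g gs ih =>
    rw [List.filter_cons]
    by_cases h : glen ≤ (g.length : Int)
    · rw [if_pos (by simpa using h)]
      exact ih _
    · rw [if_neg (by simpa using h), List.foldl_cons, pv_emit_short data glen g acc h]
      exact ih _

lemma pv_range_one_empty {a b : Int} (h : b ≤ a) : PySem.List.pyRange a b 1 = [] := by
  rw [PySem.List.pyRange_of_pos _ _ (by omega : (0:Int) < 1), if_neg (by omega)]
  rfl

-- the loop invariant: A's (index, position) run fetches back to B's run of items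
lemma pv_main_loop (data : List (List Int)) (glen : Int) (hglen : glen ≠ 0)
    (rest : List (List Int)) :
    ∀ (p : Nat), data.drop p = rest →
    ∀ (gsA : List (List (Int × Int))) (curA : List (Int × Int)),
      curA ≠ [] →
      (∀ t ∈ curA, (PySem.List.pyGet? (pvFetch data t) 0).getD 0 = t.1) →
      pvFinishA data glen
        ((PySem.List.pyRange (p : Int) (data.length : Int) 1).foldl (pvStepA (pvIndices data)) (gsA, curA))
      = (let st := rest.foldl (pvStepB glen)
            (gsA.foldl (pvEmitA data glen) [], curA.map (pvFetch data))
         pvFlush glen st.2 st.1) := by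
  induction rest with
  | nil =>
    intro p hp gsA curA hne hinv
    have hlen : data.length ≤ p := List.drop_eq_nil_iff.mp hp
    rw [pv_range_one_empty (by exact_mod_cast hlen)]
    simp only [List.foldl_nil, pvFinishA]
    rw [pv_filter_foldl, List.foldl_append, List.foldl_cons, List.foldl_nil]
    exact pv_emit_eq_flush data glen hglen curA _
  | cons item rest' ih =>
    intro p hp gsA curA hne hinv
    have hplt : p < data.length := by
      by_contra hc
      rw [List.drop_eq_nil_iff.mpr (by omega)] at hp
      simp at hp
    have hitem : data[p]? = some item := by
      rw [← List.head?_drop, hp]; rfl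
    obtain ⟨tl, htl⟩ : ∃ tl, curA.getLast? = some tl := by
      cases h : curA.getLast? with
      | none => exact absurd (List.getLast?_eq_none_iff.mp h) hne
      | some tl => exact ⟨tl, rfl⟩
    have hv : (PySem.List.pyGet? (pvIndices data) (p : Int)).getD 0 = pvHead0 item := by
      rw [pvIndices, PySem.List.pyGet?_natCast, List.getElem?_map, hitem]; rfl
    have hfetchp : pvFetch data (pvHead0 item, (p : Int)) = item := by
      rw [pvFetch, PySem.List.pyGet?_natCast, hitem]; rfl
    have hlastB : (PySem.List.pyGet? (curA.map (pvFetch data)) (-1)).getD []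
        = pvFetch data tl := by
      rw [pv_pyGet_neg_one, List.getLast?_map, htl]; rfl
    have hlastA : ((PySem.List.pyGet? curA (-1)).getD (0,0)).1 = tl.1 := by
      rw [pv_pyGet_neg_one, htl]; rfl
    have hdrop' : data.drop (p+1) = rest' := by
      rw [← List.drop_drop, hp]; rfl
    rw [PySem.List.pyRange_one_cons (by exact_mod_cast hplt), List.foldl_cons, List.foldl_cons]
    have hcast : ((p : Int) + 1) = ((p+1 : Nat) : Int) := by push_cast; ring
    by_cases hcond : pvHead0 item = tl.1 + 1
    · rw [show pvStepA (pvIndices data) (gsA, curA) (p : Int)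
            = (gsA, curA ++ [(pvHead0 item, (p : Int))]) by
          rw [pvStepA]; simp only [hv, hlastA]; rw [if_pos hcond],
          show pvStepB glen (gsA.foldl (pvEmitA data glen) [], curA.map (pvFetch data)) item
            = (gsA.foldl (pvEmitA data glen) [], curA.map (pvFetch data) ++ [item]) by
          rw [pvStepB]; simp only [hlastB]
          rw [show (PySem.List.pyGet? item 0).getD 0 = pvHead0 item from rfl,
              hinv tl (List.mem_of_getLast? htl), if_pos hcond],
          hcast]
      have := ih (p+1) hdrop' gsA (curA ++ [(pvHead0 item, (p : Int))])
        (by simp)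
        (by
          intro t ht
          rcases List.mem_append.mp ht with h | h
          · exact hinv t h
          · rw [List.mem_singleton.mp h, hfetchp]; rfl)
      rw [this, List.map_append, List.map_cons, List.map_nil, hfetchp]
    · rw [show pvStepA (pvIndices data) (gsA, curA) (p : Int)
            = (gsA ++ [curA], [(pvHead0 item, (p : Int))]) by
          rw [pvStepA]; simp only [hv, hlastA]; rw [if_neg hcond],
          show pvStepB glen (gsA.foldl (pvEmitA data glen) [], curA.map (pvFetch data)) item
            = (pvFlush glen (curA.map (pvFetch data)) (gsA.foldl (pvEmitA data glen) []), [item]) by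
          rw [pvStepB]; simp only [hlastB]
          rw [show (PySem.List.pyGet? item 0).getD 0 = pvHead0 item from rfl,
              hinv tl (List.mem_of_getLast? htl), if_neg hcond],
          hcast]
      have := ih (p+1) hdrop' (gsA ++ [curA]) [(pvHead0 item, (p : Int))]
        (by simp)
        (by
          intro t ht
          rw [List.mem_singleton.mp ht, hfetchp]; rfl)
      rw [this, List.map_cons, List.map_nil, hfetchp,
          List.foldl_append, List.foldl_cons, List.foldl_nil,
          pv_emit_eq_flush data glen hglen curA _]

-- ===== VERDICT (by name: the statement is the Claim_ definition above) =====
theorem identify_and_process_groups_spec : Claim_equal_identify_and_process_groups := by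
  unfold Claim_equal_identify_and_process_groups
  intro data glen _ hpre
  obtain ⟨hne, hall, hglen⟩ := hpre
  unfold Spec_identify_and_process_groups
  cases data with
  | nil => exact absurd rfl hne
  | cons d dtl =>
    have hfetch0 : pvFetch (d :: dtl) (pvHead0 d, 0) = d := by
      simp [pvFetch, PySem.List.pyGet?, PySem.List.pyIdx?]
    have hmain := pv_main_loop (d :: dtl) glen hglen dtl 1 rfl [] [(pvHead0 d, 0)]
      (by simp)
      (by
        intro t ht
        rw [List.mem_singleton.mp ht]
        simp only [hfetch0]
        rfl)
    simp only [pvFinishA, List.foldl_nil, List.map_cons, List.map_nil, hfetch0,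
      show ((1:Nat):Int) = 1 from rfl] at hmain
    simp only [identify_and_process_groups, identify_and_process_groups_alt]
    rw [show (PySem.List.pyGet? (pvIndices (d :: dtl)) 0).getD 0 = pvHead0 d by
          simp [pvIndices, PySem.List.pyGet?, PySem.List.pyIdx?],
        show (pvIndices (d :: dtl)).length = (d :: dtl).length by
          simp [pvIndices],
        PySem.List.slice_from _ (by omega : (0:Int) ≤ 1),
        show (PySem.List.pyGet? (d :: dtl) 0).getD [] = d by
          simp [PySem.List.pyGet?, PySem.List.pyIdx?],
        show List.drop (1:Int).toNat (d :: dtl) = dtl from rfl]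
    exact hmain
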